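-- pv_equiv track=rewrite | github.com/Against61/automl | scripts/check_arch_imports.py | has_forbidden_import
-- ===== SOURCE A (Python) =====
-- def has_forbidden_import(modules: list[str], forbidden_prefixes: tuple[str, ...]) -> list[str]:
--     bad: list[str] = []
--     for mod in modules:
--         for prefix in forbidden_prefixes:
--             if mod == prefix or mod.startswith(f"{prefix}."):
--                 bad.append(mod)
--                 break
--     return bad
-- ===== SOURCE B (Python) =====
-- def has_forbidden_import(modules: list[str], forbidden_prefixes: tuple[str, ...]) -> list[str]:
--     # Index the forbidden prefixes in a set once; then for each module check the
--     # module itself and each of its own dotted ancestors against the set, so the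
--     # inner scan over forbidden_prefixes disappears.
--     pset = set(forbidden_prefixes)
--     bad: list[str] = []
--     for mod in modules:
--         if mod in pset or any(c == "." and mod[:i] in pset for i, c in enumerate(mod)):
--             bad.append(mod)
--     return bad
-- ===== Notes on version B (the rewrite author's own statement) =====
-- stated objective: faster
-- what changed: Instead of scanning every forbidden prefix per module with string-prefix tests, B puts the prefixes in a set once and checks each module's own dotted ancestors (the module and every cut before a '.') for membership.
import Mathlib
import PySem

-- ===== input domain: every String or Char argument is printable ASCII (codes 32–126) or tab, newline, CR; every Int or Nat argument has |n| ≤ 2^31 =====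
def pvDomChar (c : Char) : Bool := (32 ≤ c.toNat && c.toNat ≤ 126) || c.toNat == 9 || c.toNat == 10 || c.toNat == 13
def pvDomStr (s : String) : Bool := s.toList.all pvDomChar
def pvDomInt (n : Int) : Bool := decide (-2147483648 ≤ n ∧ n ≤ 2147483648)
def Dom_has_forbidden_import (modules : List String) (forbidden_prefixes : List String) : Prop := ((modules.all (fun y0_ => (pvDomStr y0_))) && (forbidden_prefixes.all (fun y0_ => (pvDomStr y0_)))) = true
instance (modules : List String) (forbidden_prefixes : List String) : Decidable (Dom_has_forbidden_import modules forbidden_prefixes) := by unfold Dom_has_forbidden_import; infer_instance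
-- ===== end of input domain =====

-- B replaces A's per-module scan over forbidden_prefixes by a prefix set built once,
-- testing each module's own dotted ancestors for membership (objective: faster).


-- ===== PORT A =====
-- inner 'for prefix in forbidden_prefixes: … break' (f"{prefix}." ported exactly as prefix's chars followed by '.')
def aInner (mod : String) : List String → Bool
  | [] => false
  | p :: rest =>
    if mod == p || PySem.Chars.startswith mod.toList (p.toList ++ ['.']) then true
    else aInner mod rest

def has_forbidden_import (modules : List String) (forbidden_prefixes : List String) : List String :=
  modules.foldl (fun bad mod => if aInner mod forbidden_prefixes then bad ++ [mod] else bad) []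

-- ===== PORT B =====
-- 'mod in pset or any(c == "." and mod[:i] in pset for i, c in enumerate(mod))'
def bFlag (mod : String) (pset : PySem.Set String) : Bool :=
  pset.contains mod ||
    (PySem.List.enumerate mod.toList 0).any
      (fun ic => ic.2 == '.' && pset.contains (String.ofList (PySem.List.slice mod.toList none (some ic.1))))

def has_forbidden_import_alt (modules : List String) (forbidden_prefixes : List String) : List String :=
  let pset := PySem.Set.ofList forbidden_prefixes
  modules.foldl (fun bad mod => if bFlag mod pset then bad ++ [mod] else bad) []

-- ===== PRECONDITION & SPEC =====
def Spec_has_forbidden_import (modules : List String) (forbidden_prefixes : List String) (out : List String) : Prop := out = has_forbidden_import_alt modules forbidden_prefixes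
instance (modules : List String) (forbidden_prefixes : List String) (out : List String) : Decidable (Spec_has_forbidden_import modules forbidden_prefixes out) := by unfold Spec_has_forbidden_import; infer_instance

-- ===== CLAIM (what is proved, stated in full; the proofs are below) =====
def Claim_equal_has_forbidden_import : Prop := ∀ (modules : List String) (forbidden_prefixes : List String), Dom_has_forbidden_import modules forbidden_prefixes → Spec_has_forbidden_import modules forbidden_prefixes (has_forbidden_import modules forbidden_prefixes)

-- ===== LEMMAS AND PROOFS =====

-- A's inner loop is an 'any' over the prefixes
theorem aInner_eq_any (mod : String) (fps : List String) :
    aInner mod fps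
      = fps.any (fun p => mod == p || PySem.Chars.startswith mod.toList (p.toList ++ ['.'])) := by
  induction fps with
  | nil => rfl
  | cons p rest ih =>
    simp only [aInner, List.any_cons]
    split_ifs with h
    · simp [h]
    · simp [h, ih]

-- the prefix-plus-dot test is exactly 'some ancestor cut of mod equals p'
theorem startswith_dot_iff (m p : List Char) :
    PySem.Chars.startswith m (p ++ ['.']) = true ↔
      ∃ k : Nat, k < m.length ∧ m[k]? = some '.' ∧ m.take k = p := by
  rw [PySem.Chars.startswith_iff]
  constructor
  · rintro ⟨t, ht⟩
    refine ⟨p.length, ?_, ?_, ?_⟩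
    · subst ht; simp
    · subst ht; simp
    · subst ht; simp
  · rintro ⟨k, hk, hget, htake⟩
    refine ⟨m.drop (k + 1), ?_⟩
    have h1 : m.take (k + 1) = m.take k ++ ['.'] := by
      rw [List.take_add_one, hget]; rfl
    calc p ++ ['.'] ++ m.drop (k + 1) = m.take (k + 1) ++ m.drop (k + 1) := by
          rw [h1, htake]
      _ = m := List.take_append_drop _ _

-- the per-module decision agrees
theorem flag_eq (mod : String) (fps : List String) :
    aInner mod fps = bFlag mod (PySem.Set.ofList fps) := by
  rw [aInner_eq_any, Bool.eq_iff_iff]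
  simp only [List.any_eq_true, bFlag, Bool.or_eq_true, Bool.and_eq_true, beq_iff_eq,
    PySem.Set.contains, List.contains_iff_mem, PySem.Set.mem_ofList,
    PySem.List.mem_enumerate_iff]
  constructor
  · rintro ⟨p, hp, h | h⟩
    · exact Or.inl (h ▸ hp)
    · right
      rw [startswith_dot_iff] at h
      obtain ⟨k, hk, hget, htake⟩ := h
      refine ⟨((k : Int), '.'), ⟨k, hk, ?_⟩, rfl, ?_⟩
      · have : mod.toList[k] = '.' := by
          have := List.getElem?_eq_getElem hk
          rw [this] at hget; exact (Option.some.injEq _ _ ▸ hget).symm ▸ rfl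
        simp [this]
      · simp only
        rw [PySem.List.slice_to_natCast, htake]
        simpa using hp
  · rintro (h | ⟨⟨i, c⟩, ⟨k, hk, hpair⟩, hdot, hmem⟩)
    · exact ⟨mod, h, Or.inl rfl⟩
    · obtain ⟨hi, hc⟩ := Prod.mk.injEq _ _ _ _ ▸ hpair
      simp only at hi hc hdot hmem
      rw [hi, show ((0:Int) + (k:Int)) = ((k:Nat):Int) by omega,
        PySem.List.slice_to_natCast] at hmem
      refine ⟨String.ofList (mod.toList.take k), hmem, Or.inr ?_⟩
      rw [startswith_dot_iff]
      refine ⟨k, hk, ?_, ?_⟩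
      · rw [List.getElem?_eq_getElem hk, ← hc, hdot]
      · simp

-- ===== VERDICT (by name: the statement is the Claim_ definition above) =====
theorem has_forbidden_import_spec : Claim_equal_has_forbidden_import := by
  intro modules fps _
  unfold Spec_has_forbidden_import has_forbidden_import has_forbidden_import_alt
  have hfun : (fun (bad : List String) (mod : String) => if aInner mod fps then bad ++ [mod] else bad)
      = (fun bad mod => if bFlag mod (PySem.Set.ofList fps) then bad ++ [mod] else bad) := by
    funext bad mod; rw [flag_eq]
  rw [hfun]
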